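-- pv_equiv track=rewrite | github.com/janhq/poseless | gen_multithread.py | calculate_thread_ranges
-- ===== SOURCE A (Python) =====
-- def calculate_thread_ranges(total_poses, num_threads):
--     """
--     Calculate start and end indices for each thread to evenly distribute poses
--
--     Args:
--         total_poses (int): Total number of poses to generate
--         num_threads (int): Number of threads to use
--
--     Returns:
--         List of (start_index, end_index) tuples for each thread
--     """
--     base_chunk_size = total_poses // num_threads
--     remainder = total_poses % num_threads
--
--     # Prepare thread ranges
--     thread_ranges = []
--     current_start = 0
--
--     for thread in range(num_threads):
--
--         current_chunk_size = base_chunk_size + (1 if thread < remainder else 0)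
--         current_end = current_start + current_chunk_size
--         thread_ranges.append((current_start, current_end))
--         current_start = current_end
--
--     return thread_ranges
-- ===== SOURCE B (Python) =====
-- def calculate_thread_ranges(total_poses, num_threads):
--     base = total_poses // num_threads
--     remainder = total_poses % num_threads
--     return [
--         (i * base + min(i, remainder),
--          (i + 1) * base + min(i + 1, remainder))
--         for i in range(num_threads)
--     ]
-- ===== Notes on version B (the rewrite author's own statement) =====
-- stated objective: alternative
-- what changed: Replaces the loop-carried current_start accumulator with a closed-form per-index formula (start_i = i*base + min(i, remainder)), so each thread's range is computed independently in a comprehension.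
import Mathlib
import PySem

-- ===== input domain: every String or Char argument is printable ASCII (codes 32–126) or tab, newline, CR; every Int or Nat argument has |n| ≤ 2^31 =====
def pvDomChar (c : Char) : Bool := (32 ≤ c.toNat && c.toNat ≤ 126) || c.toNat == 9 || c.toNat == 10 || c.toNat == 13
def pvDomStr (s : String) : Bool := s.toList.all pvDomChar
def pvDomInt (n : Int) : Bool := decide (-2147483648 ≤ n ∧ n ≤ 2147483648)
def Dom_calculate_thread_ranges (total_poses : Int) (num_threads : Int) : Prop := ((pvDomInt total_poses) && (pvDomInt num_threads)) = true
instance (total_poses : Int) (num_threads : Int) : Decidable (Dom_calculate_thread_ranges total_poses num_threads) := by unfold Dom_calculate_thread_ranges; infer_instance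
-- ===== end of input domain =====

-- B replaces A's loop-carried current_start accumulator with a closed-form per-index formula.

-- ===== PORT A =====
def calculate_thread_ranges (total_poses : Int) (num_threads : Int) : List (Int × Int) :=
  let base_chunk_size := PySem.Int.floordiv total_poses num_threads
  let remainder := PySem.Int.mod total_poses num_threads
  let st := (PySem.List.pyRange 0 num_threads 1).foldl
    (fun (st : List (Int × Int) × Int) thread =>
      let current_chunk_size := base_chunk_size + (if thread < remainder then 1 else 0)
      let current_end := st.2 + current_chunk_size
      (st.1 ++ [(st.2, current_end)], current_end))
    ([], 0)
  st.1

-- ===== PORT B =====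
def calculate_thread_ranges_alt (total_poses : Int) (num_threads : Int) : List (Int × Int) :=
  let base := PySem.Int.floordiv total_poses num_threads
  let remainder := PySem.Int.mod total_poses num_threads
  (PySem.List.pyRange 0 num_threads 1).map (fun i =>
    (i * base + min i remainder, (i + 1) * base + min (i + 1) remainder))

-- ===== PRECONDITION & SPEC =====
-- Pre_ excludes num_threads = 0, where both A and B raise ZeroDivisionError.
def Pre_calculate_thread_ranges (total_poses : Int) (num_threads : Int) : Prop := num_threads ≠ 0
instance (total_poses : Int) (num_threads : Int) : Decidable (Pre_calculate_thread_ranges total_poses num_threads) := by unfold Pre_calculate_thread_ranges; infer_instance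
def pvWitness_calculate_thread_ranges : Int × Int := (7, 3)

def Spec_calculate_thread_ranges (total_poses : Int) (num_threads : Int) (out : List (Int × Int)) : Prop := out = calculate_thread_ranges_alt total_poses num_threads
instance (total_poses : Int) (num_threads : Int) (out : List (Int × Int)) : Decidable (Spec_calculate_thread_ranges total_poses num_threads out) := by unfold Spec_calculate_thread_ranges; infer_instance

-- ===== CLAIM (what is proved, stated in full; the proofs are below) =====
def Claim_equal_calculate_thread_ranges : Prop := ∀ (total_poses : Int) (num_threads : Int), Dom_calculate_thread_ranges total_poses num_threads → Pre_calculate_thread_ranges total_poses num_threads → Spec_calculate_thread_ranges total_poses num_threads (calculate_thread_ranges total_poses num_threads)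

-- ===== LEMMAS AND PROOFS =====

-- Loop invariant: after the first k iterations A's fold state is (B's first k ranges, k*base + min k rem).
lemma ctr_inv (base rem : Int) (hrem : 0 ≤ rem) (k : Nat) :
    ((PySem.List.pyRange 0 (k : Int) 1).foldl
      (fun (st : List (Int × Int) × Int) thread =>
        let current_chunk_size := base + (if thread < rem then 1 else 0)
        let current_end := st.2 + current_chunk_size
        (st.1 ++ [(st.2, current_end)], current_end))
      ([], 0))
    = ((PySem.List.pyRange 0 (k : Int) 1).map (fun i =>
        (i * base + min i rem, (i + 1) * base + min (i + 1) rem)),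
       (k : Int) * base + min (k : Int) rem) := by
  induction k with
  | zero =>
      simp [PySem.List.pyRange_one_eq_nil (by omega : (0:Int) ≤ 0)]
      omega
  | succ k ih =>
      have h : PySem.List.pyRange 0 ((k : Int) + 1) 1
          = PySem.List.pyRange 0 (k : Int) 1 ++ [(k : Int)] :=
        PySem.List.pyRange_one_succ_right (by positivity)
      push_cast
      rw [h, List.foldl_append, List.map_append, ih]
      simp only [List.foldl_cons, List.foldl_nil, List.map_cons, List.map_nil]
      rw [Prod.mk.injEq]
      have hmul : ((k : Int) + 1) * base = (k : Int) * base + base := by ring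
      rw [hmul]
      refine ⟨?_, by split_ifs <;> omega⟩
      congr 1
      simp only [List.cons.injEq, and_true, Prod.mk.injEq, true_and]
      split_ifs <;> omega

-- the invariant specialised to an arbitrary loop bound n (covers n ≤ 0 via the empty range)
lemma ctr_main (base rem n : Int) (hrem : 0 ≤ rem) :
    (((PySem.List.pyRange 0 n 1).foldl
      (fun (st : List (Int × Int) × Int) thread =>
        let current_chunk_size := base + (if thread < rem then 1 else 0)
        let current_end := st.2 + current_chunk_size
        (st.1 ++ [(st.2, current_end)], current_end))
      ([], 0)).1)
    = (PySem.List.pyRange 0 n 1).map (fun i =>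
        (i * base + min i rem, (i + 1) * base + min (i + 1) rem)) := by
  by_cases hn : n ≤ 0
  · rw [PySem.List.pyRange_one_eq_nil hn]; rfl
  · have hk : n = ((n.toNat : Nat) : Int) := by omega
    rw [hk]
    exact congrArg Prod.fst (ctr_inv base rem hrem n.toNat)

theorem calculate_thread_ranges_spec_aux (total_poses num_threads : Int)
    (h : num_threads ≠ 0) :
    calculate_thread_ranges total_poses num_threads
      = calculate_thread_ranges_alt total_poses num_threads := by
  unfold calculate_thread_ranges calculate_thread_ranges_alt
  rcases lt_or_gt_of_ne h with hn | hn
  · rw [PySem.List.pyRange_one_eq_nil (le_of_lt hn)]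
    rfl
  · exact ctr_main _ _ _ (PySem.Int.mod_nonneg total_poses hn)

-- ===== VERDICT (by name: the statement is the Claim_ definition above) =====
theorem calculate_thread_ranges_spec : Claim_equal_calculate_thread_ranges := by
  intro t n _ hpre
  exact calculate_thread_ranges_spec_aux t n hpre
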